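-- pv_equiv track=rewrite | github.com/Parsyll/ParSyll | backend/src/parsyll_fastapi/parsing/parser_regex.py | fix_course_names
-- ===== SOURCE A (Python) =====
-- def fix_course_names(text):
--     new_content = []
--     i = 0
--     while i < len(text):
--         if i + 1 < len(text):
--             if text[i][-1].isnumeric() and text[i + 1][0].isnumeric():
--                 new_content.append(text[i] + text[i + 1])
--                 i += 2
--                 continue
--             elif (
--                 text[i][-1].isalpha()
--                 and len(text[i + 1]) <= 2
--                 and text[i + 1][0].isalpha()
--             ):
--                 new_content.append(text[i] + text[i + 1])
--                 i += 2
--                 continue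
--         new_content.append(text[i])
--         i += 1
--
--     return new_content
-- ===== SOURCE B (Python) =====
-- def fix_course_names(text):
--     def mergeable(prev, t):
--         return (prev[-1].isnumeric() and t[0].isnumeric()) or (
--             prev[-1].isalpha() and len(t) <= 2 and t[0].isalpha()
--         )
--
--     out = []
--     just_merged = False
--     for t in text:
--         if out and not just_merged and mergeable(out[-1], t):
--             out[-1] += t
--             just_merged = True
--         else:
--             out.append(t)
--             just_merged = False
--     return out
-- ===== Notes on version B (the rewrite author's own statement) =====
-- stated objective: alternative
-- what changed: Replaces A's index-based while-loop that skips ahead (i += 2) after each merge with a single fold over the tokens maintaining the output list and a just_merged flag, merging each token into the previously emitted one when permitted.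
-- outside the precondition, e.g. on fix_course_names(['a;', '']): A returns ['a;', ''], B returns ['a;', '']
import Mathlib
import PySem

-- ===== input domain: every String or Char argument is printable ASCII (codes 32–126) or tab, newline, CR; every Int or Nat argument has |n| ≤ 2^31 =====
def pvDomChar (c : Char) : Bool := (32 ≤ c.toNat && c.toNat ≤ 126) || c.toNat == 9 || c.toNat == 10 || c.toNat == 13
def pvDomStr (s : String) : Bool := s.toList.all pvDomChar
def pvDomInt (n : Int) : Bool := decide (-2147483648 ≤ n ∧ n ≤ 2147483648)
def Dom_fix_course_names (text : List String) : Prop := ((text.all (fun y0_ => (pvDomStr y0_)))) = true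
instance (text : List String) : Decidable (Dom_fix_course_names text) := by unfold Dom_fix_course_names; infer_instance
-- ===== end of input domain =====

-- B replaces A's index-skipping while-loop (i += 2 after a merge) by a single fold over the
-- tokens that keeps the emitted list and a just_merged flag; same values, different decomposition.


-- ===== PORT A =====
-- s[-1] / s[0]; total stand-ins: Pre_ guarantees tokens are non-empty, so the default is never used
-- on admitted inputs.  On the ASCII domain str.isnumeric agrees with PySem.Chars.isdigit (exact there).
def pvLastCh (s : String) : Char := (PySem.Str.pyGet? s (-1)).getD ' '
def pvFirstCh (s : String) : Char := (PySem.Str.pyGet? s 0).getD ' '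

-- the two merge conditions of the Python source (numeric-numeric; alpha-short-alpha)
def pvCondNum (t u : String) : Bool :=
  PySem.Chars.isdigit (pvLastCh t) && PySem.Chars.isdigit (pvFirstCh u)
def pvCondAlpha (t u : String) : Bool :=
  PySem.Chars.isalpha (pvLastCh t) && (PySem.Str.len u ≤ 2) && PySem.Chars.isalpha (pvFirstCh u)

-- the while-loop of A: index i over text, new_content accumulator
def pvFixLoopA (text : List String) (i : Nat) (acc : List String) : List String :=
  if _h : i < text.length then
    if i + 1 < text.length then
      if pvCondNum (text.getD i "") (text.getD (i + 1) "") then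
        pvFixLoopA text (i + 2) (acc ++ [text.getD i "" ++ text.getD (i + 1) ""])
      else if pvCondAlpha (text.getD i "") (text.getD (i + 1) "") then
        pvFixLoopA text (i + 2) (acc ++ [text.getD i "" ++ text.getD (i + 1) ""])
      else
        pvFixLoopA text (i + 1) (acc ++ [text.getD i ""])
    else
      pvFixLoopA text (i + 1) (acc ++ [text.getD i ""])
  else acc
termination_by text.length - i

def fix_course_names (text : List String) : List String :=
  pvFixLoopA text 0 []

-- ===== PORT B =====
def pvMergeable (prev t : String) : Bool :=
  pvCondNum prev t || pvCondAlpha prev t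

-- one step of B's for-loop: state = (out, just_merged)
def pvStepB (st : List String × Bool) (t : String) : List String × Bool :=
  if h : st.1 ≠ [] then
    if !st.2 && pvMergeable (st.1.getLast h) t then
      (st.1.dropLast ++ [st.1.getLast h ++ t], true)
    else (st.1 ++ [t], false)
  else ([t], false)

def fix_course_names_alt (text : List String) : List String :=
  (text.foldl pvStepB ([], false)).1

-- ===== PRECONDITION & SPEC =====
-- Pre_ excludes lists containing an empty token: on most of those A (and B) raise IndexError on
-- ""[-1] or ""[0]; on the rest (an empty token shielded by a non-alphanumeric predecessor) both
-- programs still return the same value, but the raising cases are not separable in closed form.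
def Pre_fix_course_names (text : List String) : Prop := ∀ s ∈ text, s ≠ ""
instance (text : List String) : Decidable (Pre_fix_course_names text) := by
  unfold Pre_fix_course_names; infer_instance
def pvWitness_fix_course_names : List String := ["CS", "10", "50", "A"]

def Spec_fix_course_names (text : List String) (out : List String) : Prop := out = fix_course_names_alt text
instance (text : List String) (out : List String) : Decidable (Spec_fix_course_names text out) := by unfold Spec_fix_course_names; infer_instance

-- ===== CLAIM (what is proved, stated in full; the proofs are below) =====
def Claim_equal_fix_course_names : Prop := ∀ (text : List String), Dom_fix_course_names text → Pre_fix_course_names text → Spec_fix_course_names text (fix_course_names text)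

-- ===== LEMMAS AND PROOFS =====

-- A's loop, rephrased on the suffix text.drop i (proof-only helper)
def pvFixRec : List String → List String → List String
  | [], acc => acc
  | [t], acc => acc ++ [t]
  | t :: u :: rest, acc =>
    if pvMergeable t u then pvFixRec rest (acc ++ [t ++ u])
    else pvFixRec (u :: rest) (acc ++ [t])

lemma pvFixLoopA_eq_fixRec (text : List String) :
    ∀ n i acc, text.length - i ≤ n → pvFixLoopA text i acc = pvFixRec (text.drop i) acc := by
  intro n
  induction n with
  | zero =>
    intro i acc h
    have hle : text.length ≤ i := by omega
    rw [pvFixLoopA, dif_neg (by omega), List.drop_eq_nil_of_le hle, pvFixRec]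
  | succ n ih =>
    intro i acc h
    by_cases hi : i < text.length
    · have hdrop : text.drop i = text[i] :: text.drop (i + 1) :=
        List.drop_eq_getElem_cons hi
      have hgi : text.getD i "" = text[i] := List.getD_eq_getElem _ _ hi
      by_cases hi1 : i + 1 < text.length
      · have hdrop1 : text.drop (i + 1) = text[i + 1] :: text.drop (i + 2) :=
          List.drop_eq_getElem_cons hi1
        have hgi1 : text.getD (i + 1) "" = text[i + 1] := List.getD_eq_getElem _ _ hi1
        rw [pvFixLoopA, dif_pos hi, if_pos hi1, hdrop, hdrop1, pvFixRec, hgi, hgi1]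
        by_cases h1 : pvCondNum text[i] text[i + 1] = true
        · rw [if_pos h1, if_pos (show pvMergeable text[i] text[i + 1] = true by
            simp [pvMergeable, h1]), ih (i + 2) _ (by omega)]
        · rw [if_neg h1]
          by_cases h2 : pvCondAlpha text[i] text[i + 1] = true
          · rw [if_pos h2, if_pos (show pvMergeable text[i] text[i + 1] = true by
              simp [pvMergeable, h2]), ih (i + 2) _ (by omega)]
          · rw [if_neg h2, if_neg (show ¬ pvMergeable text[i] text[i + 1] = true by
              simp [pvMergeable, h1, h2]), ih (i + 1) _ (by omega), hdrop1]
      · have hlast : text.drop (i + 1) = [] :=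
          List.drop_eq_nil_of_le (by omega)
        rw [pvFixLoopA, dif_pos hi, if_neg hi1, hdrop, hlast, pvFixRec, hgi,
          ih (i + 1) _ (by omega), hlast, pvFixRec]
    · rw [pvFixLoopA, dif_neg hi, List.drop_eq_nil_of_le (by omega), pvFixRec]

lemma pvStepB_true (out : List String) (t : String) :
    pvStepB (out, true) t = (out ++ [t], false) := by
  unfold pvStepB
  by_cases h : out = [] <;> simp [h]

lemma pvStepB_false_concat (acc : List String) (t u : String) :
    pvStepB (acc ++ [t], false) u =
      if pvMergeable t u then (acc ++ [t ++ u], true) else (acc ++ [t] ++ [u], false) := by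
  unfold pvStepB
  rw [dif_pos (by simp)]
  simp

-- joint invariant for B's fold against pvFixRec
lemma pvFold_eq_fixRec :
    ∀ n (rest : List String), rest.length ≤ n →
      (∀ out, (List.foldl pvStepB (out, true) rest).1 = pvFixRec rest out) ∧
      (∀ t acc, (List.foldl pvStepB (acc ++ [t], false) rest).1 = pvFixRec (t :: rest) acc) := by
  intro n
  induction n with
  | zero =>
    intro rest h
    have : rest = [] := List.eq_nil_of_length_eq_zero (by omega)
    subst this
    exact ⟨fun out => by simp [pvFixRec], fun t acc => by simp [pvFixRec]⟩
  | succ n ih =>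
    intro rest h
    match rest with
    | [] => exact ⟨fun out => by simp [pvFixRec], fun t acc => by simp [pvFixRec]⟩
    | u :: rest' =>
      have hlen : rest'.length ≤ n := by simpa using Nat.lt_succ_iff.mp (by simpa using h)
      constructor
      · intro out
        rw [List.foldl_cons, pvStepB_true, (ih rest' hlen).2 u out]
      · intro t acc
        rw [List.foldl_cons, pvStepB_false_concat]
        by_cases hm : pvMergeable t u = true
        · rw [if_pos hm, (ih rest' hlen).1 (acc ++ [t ++ u])]
          rw [pvFixRec, if_pos hm]
        · rw [if_neg hm, (ih rest' hlen).2 u (acc ++ [t])]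
          rw [pvFixRec, if_neg hm]

lemma pvAlt_eq_fixRec (text : List String) :
    fix_course_names_alt text = pvFixRec text [] := by
  unfold fix_course_names_alt
  match text with
  | [] => simp [pvFixRec]
  | t :: rest =>
    have hstep : pvStepB ([], false) t = (([] : List String) ++ [t], false) := by
      unfold pvStepB; simp
    rw [List.foldl_cons, hstep, (pvFold_eq_fixRec rest.length rest le_rfl).2 t []]

-- ===== VERDICT (by name: the statement is the Claim_ definition above) =====
theorem fix_course_names_spec : Claim_equal_fix_course_names := by
  intro text _ _
  unfold Spec_fix_course_names fix_course_names
  rw [pvFixLoopA_eq_fixRec text text.length 0 [] (by omega), List.drop_zero,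
    pvAlt_eq_fixRec]
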